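-- pv_equiv track=rewrite | github.com/marian37/advent-of-code-2023 | 12.py | replaceUnknown
-- ===== SOURCE A (Python) =====
-- def replaceUnknown(text, i):
--     replaced = []
--     j = 0
--     for c in text:
--         if c == "?":
--             bit = i & 1 << j
--             if bit:
--                 replaced.append("#")
--             else:
--                 replaced.append(".")
--             j += 1
--         else:
--             replaced.append(c)
--     return "".join(replaced)
-- ===== SOURCE B (Python) =====
-- def replaceUnknown(text, i):
--     parts = text.split("?")
--     out = parts[0]
--     b = 0
--     for part in parts[1:]:
--         out += "#" if i & 1 << b else "."
--         out += part
--         b += 1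
--     return out
-- ===== Notes on version B (the rewrite author's own statement) =====
-- stated objective: faster
-- what changed: B splits the text on '?' with str.split and rebuilds it by concatenating the gap strings with one bit-derived character between consecutive parts, instead of A's character-by-character streaming loop that counts '?'s and appends to a list; the per-character work moves into C-level str.split/concatenation.
import Mathlib
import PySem

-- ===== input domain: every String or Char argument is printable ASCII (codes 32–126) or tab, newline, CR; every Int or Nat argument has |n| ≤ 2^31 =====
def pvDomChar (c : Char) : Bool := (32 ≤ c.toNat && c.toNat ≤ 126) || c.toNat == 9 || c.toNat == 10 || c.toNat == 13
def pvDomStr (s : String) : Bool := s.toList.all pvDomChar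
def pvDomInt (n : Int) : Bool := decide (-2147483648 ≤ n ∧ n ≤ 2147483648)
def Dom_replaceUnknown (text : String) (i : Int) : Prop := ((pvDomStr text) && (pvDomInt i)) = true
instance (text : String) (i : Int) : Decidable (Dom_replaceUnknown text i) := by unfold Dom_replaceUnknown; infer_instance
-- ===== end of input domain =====

-- B splits the text on '?' and rebuilds it with one bit-derived character between
-- consecutive parts, instead of A's character-by-character streaming append loop.

-- ===== PORT A =====
-- streaming loop: state is (replaced chars so far, number of '?' seen so far);
-- Python's j is a nonnegative int counter, carried as Nat
def replaceUnknown (text : String) (i : Int) : String :=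
  let st := text.toList.foldl
    (fun (st : List Char × Nat) c =>
      if c == '?' then
        let bit := PySem.Int.band i ((1 : Int) <<< st.2)
        (if bit != 0 then st.1 ++ ['#'] else st.1 ++ ['.'], st.2 + 1)
      else (st.1 ++ [c], st.2))
    ([], 0)
  String.mk st.1

-- ===== PORT B =====
-- parts = text.split("?"): str.split never returns an empty list, so Python's
-- parts[0] is its head (headD can never take the default); parts[1:] is slice from 1.
-- Python's b is a nonnegative int counter, carried as Nat.
def replaceUnknown_alt (text : String) (i : Int) : String :=
  let parts := PySem.Chars.splitOn text.toList ['?']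
  let st := (PySem.List.slice parts (some 1) none).foldl
    (fun (st : List Char × Nat) part =>
      (st.1 ++ [if PySem.Int.band i ((1 : Int) <<< st.2) != 0 then '#' else '.'] ++ part,
       st.2 + 1))
    (parts.headD [], 0)
  String.mk st.1

-- ===== PRECONDITION & SPEC =====
def Spec_replaceUnknown (text : String) (i : Int) (out : String) : Prop := out = replaceUnknown_alt text i
instance (text : String) (i : Int) (out : String) : Decidable (Spec_replaceUnknown text i out) := by unfold Spec_replaceUnknown; infer_instance

-- ===== CLAIM (what is proved, stated in full; the proofs are below) =====
def Claim_equal_replaceUnknown : Prop := ∀ (text : String) (i : Int), Dom_replaceUnknown text i → Spec_replaceUnknown text i (replaceUnknown text i)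

-- ===== LEMMAS AND PROOFS =====

-- the bit-to-char choice both programs make for the j-th '?'
def pvBitChar (i : Int) (j : Nat) : Char :=
  if PySem.Int.band i ((1 : Int) <<< j) != 0 then '#' else '.'

-- common reference: replace each '?' by the bit of i indexed by the number of '?' seen
def pvRep (i : Int) : List Char → Nat → List Char
  | [], _ => []
  | c :: cs, j =>
    if c == '?' then pvBitChar i j :: pvRep i cs (j + 1)
    else c :: pvRep i cs j

-- named copy of A's fold step
def pvStepA (i : Int) (st : List Char × Nat) (c : Char) : List Char × Nat :=
  if c == '?' then
    let bit := PySem.Int.band i ((1 : Int) <<< st.2)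
    (if bit != 0 then st.1 ++ ['#'] else st.1 ++ ['.'], st.2 + 1)
  else (st.1 ++ [c], st.2)

theorem pvRep_A (i : Int) (cs : List Char) : ∀ (acc : List Char) (j : Nat),
    (cs.foldl (pvStepA i) (acc, j)).1 = acc ++ pvRep i cs j := by
  induction cs with
  | nil => intro acc j; simp [pvRep]
  | cons c cs ih =>
    intro acc j
    rw [List.foldl_cons]
    cases hc : (c == '?') with
    | true =>
      have hstep : pvStepA i (acc, j) c = (acc ++ [pvBitChar i j], j + 1) := by
        cases hb : (PySem.Int.band i ((1 : Int) <<< j) != 0) <;>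
          simp [pvStepA, pvBitChar, hc, hb]
      rw [hstep, ih]
      simp [pvRep, hc]
    | false =>
      have hstep : pvStepA i (acc, j) c = (acc ++ [c], j) := by simp [pvStepA, hc]
      rw [hstep, ih]
      simp [pvRep, hc]

-- fuel-free reference for splitting on the single character '?'
def pvSplit : List Char → List Char → List (List Char)
  | pre, [] => [pre]
  | pre, c :: rest =>
    if c == '?' then pre :: pvSplit [] rest else pvSplit (pre ++ [c]) rest

theorem pvSplit_ne_nil (l pre : List Char) : pvSplit pre l ≠ [] := by
  induction l generalizing pre with
  | nil => simp [pvSplit]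
  | cons c rest ih =>
    cases hc : (c == '?') <;> simp [pvSplit, hc] <;> exact ih _


theorem go_eq_pvSplit : ∀ (fuel : Nat) (l cur : List Char) (hacc : List (List Char)),
    l.length < fuel →
    PySem.Chars.splitOn.go ['?'] fuel l cur hacc = hacc.reverse ++ pvSplit cur.reverse l := by
  intro fuel
  induction fuel with
  | zero => intro l _ _ h; omega
  | succ n ih =>
    intro l cur hacc hlen
    cases l with
    | nil =>
      simp [PySem.Chars.splitOn.go, pvSplit]
    | cons c rest =>
      cases hc : (c == '?') with
      | true =>
        have h1 : (['?'] : List Char).isPrefixOf (c :: rest) = true := by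
          simp [List.isPrefixOf]; exact ((beq_iff_eq).mp hc).symm
        rw [show PySem.Chars.splitOn.go ['?'] (n+1) (c :: rest) cur hacc
              = PySem.Chars.splitOn.go ['?'] n (List.drop 1 (c :: rest)) [] (cur.reverse :: hacc) by
            conv_lhs => rw [PySem.Chars.splitOn.go]
            simp [h1]]
        rw [show List.drop 1 (c :: rest) = rest from rfl,
            ih rest [] (cur.reverse :: hacc) (by simpa using Nat.lt_of_succ_lt_succ hlen)]
        simp [pvSplit, hc]
      | false =>
        have h1 : (['?'] : List Char).isPrefixOf (c :: rest) = false := by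
          simp [List.isPrefixOf]
          intro h; rw [h] at hc; simp at hc
        rw [show PySem.Chars.splitOn.go ['?'] (n+1) (c :: rest) cur hacc
              = PySem.Chars.splitOn.go ['?'] n rest (c :: cur) hacc by
            conv_lhs => rw [PySem.Chars.splitOn.go]
            simp [h1]]
        rw [ih rest (c :: cur) hacc (by simpa using Nat.lt_of_succ_lt_succ hlen)]
        simp [pvSplit, hc]

theorem splitOn_eq_pvSplit (cs : List Char) :
    PySem.Chars.splitOn cs ['?'] = pvSplit [] cs := by
  unfold PySem.Chars.splitOn
  rw [go_eq_pvSplit (cs.length + 1) cs [] [] (Nat.lt_succ_self _)]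
  simp

-- named copy of B's fold step
def pvStepB (i : Int) (st : List Char × Nat) (part : List Char) : List Char × Nat :=
  (st.1 ++ [if PySem.Int.band i ((1 : Int) <<< st.2) != 0 then '#' else '.'] ++ part, st.2 + 1)

-- join of the later parts: one bit character before each
def pvTailJoin (i : Int) : Nat → List (List Char) → List Char
  | _, [] => []
  | j, p :: ps => pvBitChar i j :: (p ++ pvTailJoin i (j + 1) ps)

theorem pvStepB_fold (i : Int) (ps : List (List Char)) : ∀ (out : List Char) (b : Nat),
    (ps.foldl (pvStepB i) (out, b)).1 = out ++ pvTailJoin i b ps := by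
  induction ps with
  | nil => intro out b; simp [pvTailJoin]
  | cons p ps ih =>
    intro out b
    rw [List.foldl_cons]
    have hstep : pvStepB i (out, b) p = (out ++ [pvBitChar i b] ++ p, b + 1) := by
      cases hb : (PySem.Int.band i ((1 : Int) <<< b) != 0) <;> simp [pvStepB, pvBitChar, hb]
    rw [hstep, ih]
    simp [pvTailJoin]

def pvJoinParts (i : Int) (j : Nat) : List (List Char) → List Char
  | [] => []
  | p :: ps => p ++ pvTailJoin i j ps

theorem pvJoin_pvSplit (i : Int) (l : List Char) : ∀ (pre : List Char) (j : Nat),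
    pvJoinParts i j (pvSplit pre l) = pre ++ pvRep i l j := by
  induction l with
  | nil => intro pre j; simp [pvSplit, pvJoinParts, pvRep, pvTailJoin]
  | cons c rest ih =>
    intro pre j
    cases hc : (c == '?') with
    | true =>
      simp only [pvSplit, hc, if_true, pvJoinParts]
      obtain ⟨p0, ps, hps⟩ := List.exists_cons_of_ne_nil (pvSplit_ne_nil rest [])
      have hih := ih [] (j + 1)
      rw [hps] at hih ⊢
      simp only [pvJoinParts, List.nil_append] at hih
      simp only [pvTailJoin, pvRep, hc, if_true]
      rw [hih]
    | false =>
      simp only [pvSplit, hc, Bool.false_eq_true, if_false]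
      rw [ih (pre ++ [c]) j]
      simp [pvRep, hc]

-- ===== VERDICT (by name: the statement is the Claim_ definition above) =====
theorem replaceUnknown_spec : Claim_equal_replaceUnknown := by
  intro text i _
  show replaceUnknown text i = replaceUnknown_alt text i
  have hA := pvRep_A i text.toList [] 0
  simp only [List.nil_append] at hA
  show String.mk (text.toList.foldl (pvStepA i) ([], 0)).1
      = String.mk ((PySem.List.slice (PySem.Chars.splitOn text.toList ['?']) (some 1) none).foldl
          (pvStepB i) ((PySem.Chars.splitOn text.toList ['?']).headD [], 0)).1
  rw [hA, splitOn_eq_pvSplit]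
  obtain ⟨p0, ps, hps⟩ := List.exists_cons_of_ne_nil (pvSplit_ne_nil text.toList [])
  rw [hps]
  have hslice : PySem.List.slice (p0 :: ps) (some 1) none = ps := by
    simp [PySem.List.slice_from]
  rw [hslice]
  rw [pvStepB_fold]
  have hj := pvJoin_pvSplit i text.toList [] 0
  rw [hps] at hj
  simp only [pvJoinParts, List.nil_append, List.headD_cons] at hj ⊢
  rw [hj]
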